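-- pv_equiv track=rewrite | github.com/weirdkidsima/penzGTU | Math/Alehina/5.py | create_relation_matrix
-- ===== SOURCE A (Python) =====
-- def create_relation_matrix(relation, universe):
--     matrix = []
--     for i in range(1, len(universe) + 1):
--         row = []
--         for j in range(1, len(universe) + 1):
--             if (i, j) in relation:
--                 row.append(1)
--             else:
--                 row.append(0)
--         matrix.append(row)
--     return matrix
-- ===== SOURCE B (Python) =====
-- def create_relation_matrix(relation, universe):
--     n = len(universe)
--     matrix = [[0] * n for _ in range(n)]
--     for (i, j) in relation:
--         if 1 <= i <= n and 1 <= j <= n: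
--             matrix[i - 1][j - 1] = 1
--     return matrix
-- ===== Notes on version B (the rewrite author's own statement) =====
-- stated objective: faster
-- what changed: Instead of probing every (i,j) cell with a linear membership scan of the relation list, B allocates an n-by-n zero matrix once and scatters a 1 for each in-range pair of the relation in a single pass.
import Mathlib
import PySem

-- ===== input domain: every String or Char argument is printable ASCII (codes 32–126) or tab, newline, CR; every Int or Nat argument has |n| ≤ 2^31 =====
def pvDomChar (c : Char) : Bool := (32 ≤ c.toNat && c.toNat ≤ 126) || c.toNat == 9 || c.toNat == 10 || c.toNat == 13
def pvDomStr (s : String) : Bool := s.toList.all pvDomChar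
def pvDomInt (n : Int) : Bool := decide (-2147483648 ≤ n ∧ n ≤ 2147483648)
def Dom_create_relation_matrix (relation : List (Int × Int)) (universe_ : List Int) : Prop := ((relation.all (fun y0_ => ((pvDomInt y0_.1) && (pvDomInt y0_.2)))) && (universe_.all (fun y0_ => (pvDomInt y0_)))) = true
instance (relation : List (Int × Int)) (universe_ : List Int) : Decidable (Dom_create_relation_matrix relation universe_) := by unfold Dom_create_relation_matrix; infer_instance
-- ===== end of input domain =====

-- B replaces A's per-cell membership scan by zero-initialising the matrix and scattering 1s from the relation in one pass (faster).


-- ===== PORT A =====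
def create_relation_matrix (relation : List (Int × Int)) (universe_ : List Int) : List (List Int) :=
  (PySem.List.pyRange 1 ((universe_.length : Int) + 1) 1).foldl
    (fun matrix i =>
      matrix ++ [(PySem.List.pyRange 1 ((universe_.length : Int) + 1) 1).foldl
        (fun row j => row ++ [if (i, j) ∈ relation then (1 : Int) else 0]) []])
    []

-- ===== PORT B =====
-- one scatter step: if the pair is in range, set cell (i-1, j-1) to 1
def crmStep (n : Nat) (m : List (List Int)) (p : Int × Int) : List (List Int) :=
  if 1 ≤ p.1 ∧ p.1 ≤ (n : Int) ∧ 1 ≤ p.2 ∧ p.2 ≤ (n : Int) then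
    m.modify (p.1 - 1).toNat (fun row => row.set (p.2 - 1).toNat 1)
  else m

def create_relation_matrix_alt (relation : List (Int × Int)) (universe_ : List Int) : List (List Int) :=
  relation.foldl (crmStep universe_.length)
    (List.replicate universe_.length (List.replicate universe_.length (0 : Int)))

-- ===== PRECONDITION & SPEC =====
def Spec_create_relation_matrix (relation : List (Int × Int)) (universe_ : List Int) (out : List (List Int)) : Prop := out = create_relation_matrix_alt relation universe_
instance (relation : List (Int × Int)) (universe_ : List Int) (out : List (List Int)) : Decidable (Spec_create_relation_matrix relation universe_ out) := by unfold Spec_create_relation_matrix; infer_instance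

-- ===== CLAIM (what is proved, stated in full; the proofs are below) =====
def Claim_equal_create_relation_matrix : Prop := ∀ (relation : List (Int × Int)) (universe_ : List Int), Dom_create_relation_matrix relation universe_ → Spec_create_relation_matrix relation universe_ (create_relation_matrix relation universe_)

-- ===== LEMMAS AND PROOFS =====

-- the cell at (i, j), if present
def crmCell (M : List (List Int)) (i j : Nat) : Option Int :=
  M[i]?.bind (fun r => r[j]?)

-- n×n shape
def crmShape (n : Nat) (M : List (List Int)) : Prop :=
  M.length = n ∧ ∀ (i : Nat) (r : List Int), M[i]? = some r → r.length = n

theorem crmStep_shape (n : Nat) (M : List (List Int)) (p : Int × Int)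
    (h : crmShape n M) : crmShape n (crmStep n M p) := by
  obtain ⟨h1, h2⟩ := h
  unfold crmStep
  split
  · refine ⟨by simpa [List.length_modify] using h1, ?_⟩
    intro i r hr
    rw [List.getElem?_modify] at hr
    cases hM : M[i]? with
    | none => simp [hM] at hr
    | some r0 =>
      simp only [hM, Option.map_eq_map, Option.map_some] at hr
      cases hr
      split <;> simp [h2 i r0 hM]
  · exact ⟨h1, h2⟩

theorem crmStep_cell (n : Nat) (M : List (List Int)) (p : Int × Int)
    (h : crmShape n M) (i j : Nat) (hi : i < n) (hj : j < n) :
    crmCell (crmStep n M p) i j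
      = if p = (1 + (i : Int), 1 + (j : Int)) then some 1 else crmCell M i j := by
  obtain ⟨h1, h2⟩ := h
  have hilen : i < M.length := h1 ▸ hi
  obtain ⟨Ri, hRi⟩ : ∃ r, M[i]? = some r := ⟨M[i], List.getElem?_eq_getElem hilen⟩
  have hrl : Ri.length = n := h2 i Ri hRi
  unfold crmStep
  split
  · rename_i hg
    obtain ⟨g1, g2, g3, g4⟩ := hg
    rw [crmCell, List.getElem?_modify, hRi]
    simp only [Option.map_eq_map, Option.map_some, Option.bind_some]
    by_cases hri : (p.1 - 1).toNat = i
    · have hp1 : p.1 = 1 + (i : Int) := by omega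
      rw [if_pos hri]
      by_cases hcj : (p.2 - 1).toNat = j
      · have hp2 : p.2 = 1 + (j : Int) := by omega
        have hpe : p = (1 + (i : Int), 1 + (j : Int)) := Prod.ext hp1 hp2
        rw [if_pos hpe, List.getElem?_set, if_pos hcj, if_pos (by rw [hrl]; omega)]
      · have hpe : p ≠ (1 + (i : Int), 1 + (j : Int)) := by
          intro he; apply hcj; rw [he]; omega
        rw [if_neg hpe, List.getElem?_set, if_neg hcj, crmCell, hRi, Option.bind_some]
    · have hpe : p ≠ (1 + (i : Int), 1 + (j : Int)) := by
        intro he; apply hri; rw [he]; omega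
      rw [if_neg hri, if_neg hpe, crmCell, hRi, Option.bind_some]
  · rename_i hg
    have hpe : p ≠ (1 + (i : Int), 1 + (j : Int)) := by
      intro he; apply hg; rw [he]
      refine ⟨by omega, by omega, by omega, by omega⟩
    rw [if_neg hpe]

theorem crmFold_shape (n : Nat) (rel : List (Int × Int)) (M : List (List Int))
    (h : crmShape n M) : crmShape n (rel.foldl (crmStep n) M) := by
  induction rel generalizing M with
  | nil => exact h
  | cons p rel ih => exact ih _ (crmStep_shape n M p h)

theorem crmFold_cell (n : Nat) (rel : List (Int × Int)) (M : List (List Int))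
    (h : crmShape n M) (i j : Nat) (hi : i < n) (hj : j < n) :
    crmCell (rel.foldl (crmStep n) M) i j
      = if (1 + (i : Int), 1 + (j : Int)) ∈ rel then some 1 else crmCell M i j := by
  induction rel generalizing M with
  | nil => simp
  | cons p rel ih =>
    rw [List.foldl_cons, ih _ (crmStep_shape n M p h),
        crmStep_cell n M p h i j hi hj]
    by_cases h1 : (1 + (i : Int), 1 + (j : Int)) ∈ rel
    · simp [h1]
    · by_cases h2 : p = (1 + (i : Int), 1 + (j : Int)) <;>
        simp [h1, h2, eq_comm]

theorem crmZeros_shape (n : Nat) :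
    crmShape n (List.replicate n (List.replicate n (0 : Int))) := by
  refine ⟨List.length_replicate, ?_⟩
  intro i r hr
  rw [List.getElem?_replicate] at hr
  split at hr
  · cases hr; exact List.length_replicate
  · cases hr

theorem crmZeros_cell (n i j : Nat) (hi : i < n) (hj : j < n) :
    crmCell (List.replicate n (List.replicate n (0 : Int))) i j = some 0 := by
  simp [crmCell, hi, hj]

theorem foldl_append_map {α β : Type} (l : List α) (f : α → β) (acc : List β) :
    l.foldl (fun acc x => acc ++ [f x]) acc = acc ++ l.map f := by
  induction l generalizing acc with
  | nil => simp
  | cons x l ih => simp [ih]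

-- A computes the map-form matrix
theorem createA_eq_map (relation : List (Int × Int)) (universe_ : List Int) :
    create_relation_matrix relation universe_
      = (List.range universe_.length).map (fun (i : Nat) =>
          (List.range universe_.length).map (fun (j : Nat) =>
            if (1 + (i : Int), 1 + (j : Int)) ∈ relation then (1 : Int) else 0)) := by
  unfold create_relation_matrix
  rw [foldl_append_map, List.nil_append]
  rw [PySem.List.pyRange_one]
  have hn : ((universe_.length : Int) + 1 - 1).toNat = universe_.length := by omega
  rw [hn, List.map_map]
  apply List.map_congr_left
  intro i _
  simp only [Function.comp]
  rw [foldl_append_map, List.nil_append, List.map_map]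
  rfl

-- B computes the same matrix
theorem createB_eq_map (relation : List (Int × Int)) (universe_ : List Int) :
    create_relation_matrix_alt relation universe_
      = (List.range universe_.length).map (fun (i : Nat) =>
          (List.range universe_.length).map (fun (j : Nat) =>
            if (1 + (i : Int), 1 + (j : Int)) ∈ relation then (1 : Int) else 0)) := by
  set n := universe_.length with hn
  have hsh := crmFold_shape n relation _ (crmZeros_shape n)
  have hlen : (create_relation_matrix_alt relation universe_).length = n := hsh.1
  have hcellF : ∀ (i j : Nat), i < n → j < n →
      crmCell (create_relation_matrix_alt relation universe_) i j
        = if (1 + (i : Int), 1 + (j : Int)) ∈ relation then some 1 else some 0 := by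
    intro i j hi hj
    show crmCell (relation.foldl (crmStep n) _) i j = _
    rw [crmFold_cell n relation _ (crmZeros_shape n) i j hi hj, crmZeros_cell n i j hi hj]
  apply List.ext_getElem?
  intro i
  by_cases hi : i < n
  · have hilen : i < (create_relation_matrix_alt relation universe_).length := hlen ▸ hi
    obtain ⟨Bi, hBi⟩ : ∃ r, (create_relation_matrix_alt relation universe_)[i]? = some r :=
      ⟨_, List.getElem?_eq_getElem hilen⟩
    have hrowlen : Bi.length = n := hsh.2 i Bi hBi
    rw [hBi, List.getElem?_map, List.getElem?_range hi, Option.map_some]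
    congr 1
    apply List.ext_getElem?
    intro j
    by_cases hj : j < n
    · have hjlen : j < Bi.length := by rw [hrowlen]; exact hj
      have hc := hcellF i j hi hj
      rw [crmCell, hBi, Option.bind_some] at hc
      rw [List.getElem?_map, List.getElem?_range hj, Option.map_some, hc]
      split <;> rfl
    · rw [List.getElem?_eq_none (by rw [hrowlen]; omega),
          List.getElem?_eq_none (by simpa using hj)]
  · rw [List.getElem?_eq_none (by rw [hlen]; omega),
        List.getElem?_eq_none (by simpa using hi)]

-- ===== VERDICT (by name: the statement is the Claim_ definition above) =====
theorem create_relation_matrix_spec : Claim_equal_create_relation_matrix := by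
  intro relation universe_ _
  unfold Spec_create_relation_matrix
  rw [createA_eq_map, createB_eq_map]
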